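-- pv_equiv track=rewrite | github.com/tamlhp/2801ict | week-2/problem-set/prob6.py | reverse_stack_with_two_stacks
-- ===== SOURCE A (Python) =====
-- def reverse_stack_with_two_stacks(S):
--     R = []
--     T = []
--     while S:
--         R.append(S.pop())
--     while R:
--         T.append(R.pop())
--     while T:
--         S.append(T.pop())
--     return S
-- ===== SOURCE B (Python) =====
-- def reverse_stack_with_two_stacks(S):
--     n = len(S)
--     for i in range(n // 2):
--         S[i], S[n - 1 - i] = S[n - 1 - i], S[i]
--     return S
-- ===== Notes on version B (the rewrite author's own statement) =====
-- stated objective: simpler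
-- what changed: Replaces the three auxiliary-stack transfer passes with a single in-place two-pointer swap loop over the first half of the indices, removing the auxiliary lists.
import Mathlib
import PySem

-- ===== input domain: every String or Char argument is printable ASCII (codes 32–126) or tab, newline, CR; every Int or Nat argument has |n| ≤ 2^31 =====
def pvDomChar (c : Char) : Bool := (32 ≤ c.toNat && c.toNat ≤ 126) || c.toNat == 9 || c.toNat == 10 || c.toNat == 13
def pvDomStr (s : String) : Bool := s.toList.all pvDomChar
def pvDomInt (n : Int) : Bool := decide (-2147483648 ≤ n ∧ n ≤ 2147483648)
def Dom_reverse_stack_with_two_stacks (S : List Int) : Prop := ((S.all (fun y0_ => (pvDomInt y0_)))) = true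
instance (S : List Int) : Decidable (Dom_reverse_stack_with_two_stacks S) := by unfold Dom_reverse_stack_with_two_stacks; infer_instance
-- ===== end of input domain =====

-- B replaces A's three auxiliary-stack transfer passes with one in-place two-pointer swap loop (simpler, O(1) extra space).


-- ===== PORT A =====
-- 'while X: Y.append(X.pop())' — move the last element of X onto Y until X is empty.
def pvTransfer : List Int → List Int → List Int
  | [], acc => acc
  | x :: xs, acc =>
      pvTransfer ((x :: xs).dropLast) (acc ++ [(x :: xs).getLast (by simp)])
termination_by S _ => S.length
decreasing_by simp [List.length_dropLast]

def reverse_stack_with_two_stacks (S : List Int) : List Int :=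
  -- R = []; T = []; three transfer loops; the final S is returned
  let R := pvTransfer S []
  let T := pvTransfer R []
  pvTransfer T []

-- ===== PORT B =====
-- one swap step S[i], S[n-1-i] = S[n-1-i], S[i]
def pvSwap (n : Nat) (L : List Int) (i : Nat) : List Int :=
  let a := L.getD i 0
  let b := L.getD (n - 1 - i) 0
  (L.set i b).set (n - 1 - i) a

def reverse_stack_with_two_stacks_alt (S : List Int) : List Int :=
  let n := S.length
  (List.range (n / 2)).foldl (pvSwap n) S

-- ===== PRECONDITION & SPEC =====
def Spec_reverse_stack_with_two_stacks (S : List Int) (out : List Int) : Prop := out = reverse_stack_with_two_stacks_alt S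
instance (S : List Int) (out : List Int) : Decidable (Spec_reverse_stack_with_two_stacks S out) := by unfold Spec_reverse_stack_with_two_stacks; infer_instance

-- ===== CLAIM (what is proved, stated in full; the proofs are below) =====
def Claim_equal_reverse_stack_with_two_stacks : Prop := ∀ (S : List Int), Dom_reverse_stack_with_two_stacks S → Spec_reverse_stack_with_two_stacks S (reverse_stack_with_two_stacks S)

-- ===== LEMMAS AND PROOFS =====
theorem pvTransfer_eq (S acc : List Int) : pvTransfer S acc = acc ++ S.reverse := by
  induction S, acc using pvTransfer.induct with
  | case1 acc => simp [pvTransfer]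
  | case2 x xs acc ih =>
      rw [pvTransfer, ih]
      conv_rhs => rw [← List.dropLast_append_getLast (l := x :: xs) (by simp)]
      simp

theorem portA_eq_reverse (S : List Int) : reverse_stack_with_two_stacks S = S.reverse := by
  simp [reverse_stack_with_two_stacks, pvTransfer_eq]

theorem pvSwap_length (n : Nat) (L : List Int) (i : Nat) : (pvSwap n L i).length = L.length := by
  simp [pvSwap]

theorem pvSwap_getD (n : Nat) (L : List Int) (i j : Nat) (hlen : L.length = n)
    (hi : i < n) (hj : j < n) :
    (pvSwap n L i).getD j 0 =
      if j = i then L.getD (n - 1 - i) 0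
      else if j = n - 1 - i then L.getD i 0
      else L.getD j 0 := by
  simp only [pvSwap, List.getD_eq_getElem?_getD, List.getElem?_set, List.length_set, hlen]
  split_ifs <;> first | rfl | (exfalso; omega) | simp_all

theorem fold_swap_inv (S : List Int) (m : Nat) (hm : m ≤ S.length / 2) :
    ((List.range m).foldl (pvSwap S.length) S).length = S.length ∧
    ∀ j, j < S.length →
      ((List.range m).foldl (pvSwap S.length) S).getD j 0 =
        if j < m ∨ S.length - m ≤ j then S.getD (S.length - 1 - j) 0 else S.getD j 0 := by
  induction m with
  | zero =>
      refine ⟨rfl, ?_⟩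
      intro j hj
      rw [if_neg (by omega)]
      rfl
  | succ m ih =>
      have hm' : m ≤ S.length / 2 := by omega
      obtain ⟨hlen, hget⟩ := ih hm'
      rw [List.range_succ, List.foldl_append]
      set L := (List.range m).foldl (pvSwap S.length) S with hL
      have hmn : m < S.length := by omega
      constructor
      · simp [pvSwap_length, hlen]
      · intro j hj
        simp only [List.foldl_cons, List.foldl_nil]
        rw [pvSwap_getD S.length L m j hlen hmn hj]
        rw [hget j hj, hget m hmn, hget (S.length - 1 - m) (by omega)]
        split_ifs <;> first | rfl | (exfalso; omega) | (congr 1; omega)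

theorem portB_eq_reverse (S : List Int) : reverse_stack_with_two_stacks_alt S = S.reverse := by
  obtain ⟨hlen, hget⟩ := fold_swap_inv S (S.length / 2) (le_refl _)
  show (List.range (S.length / 2)).foldl (pvSwap S.length) S = S.reverse
  apply List.ext_getElem
  · simpa using hlen
  · intro j h1 h2
    have hj : j < S.length := by simpa using h2
    rw [List.getElem_reverse, ← List.getD_eq_getElem _ 0, ← List.getD_eq_getElem _ 0]
    rw [hget j hj]
    by_cases hcase : j < S.length / 2 ∨ S.length - S.length / 2 ≤ j
    · rw [if_pos hcase]
    · rw [if_neg hcase]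
      congr 1
      omega

-- ===== VERDICT (by name: the statement is the Claim_ definition above) =====
theorem reverse_stack_with_two_stacks_spec : Claim_equal_reverse_stack_with_two_stacks := by
  intro S _
  unfold Spec_reverse_stack_with_two_stacks
  rw [portA_eq_reverse, portB_eq_reverse]
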